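-- pv_equiv track=rewrite | github.com/ddoplayer2012/py | work2/main.py | where_complex
-- ===== SOURCE A (Python) =====
-- def where_complex(where_sql):
--     '''
--     条件复制起来
--     :return:
--     '''
--
--     test = where_sql
--     count = 1
--     test_list = []
--     flag_list = []
--     all_list = []
--     for i in range(len(test)):
--         # print (count % 3)
--         if count % 4 != 0:
--             test_list.append(test[i])
--         else:
--             flag_list.append(test[i])
--             all_list.append(test_list)
--             test_list = []
--         count += 1
--     if test_list != []:
--         all_list.append(test_list)
--         test_list = []
--     if "where" in flag_list:
--         pass
--     return all_list, flag_list
-- ===== SOURCE B (Python) =====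
-- def where_complex(where_sql):
--     all_list = [list(where_sql[i:i+3]) for i in range(0, len(where_sql), 4)]
--     flag_list = list(where_sql[3::4])
--     return all_list, flag_list
-- ===== Notes on version B (the rewrite author's own statement) =====
-- stated objective: simpler
-- what changed: Replaced the counter-driven state machine (count % 4, accumulator lists, trailing flush) with two direct slice expressions: every 4th element via where_sql[3::4] and the groups of up to three via strided slices.
import Mathlib
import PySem

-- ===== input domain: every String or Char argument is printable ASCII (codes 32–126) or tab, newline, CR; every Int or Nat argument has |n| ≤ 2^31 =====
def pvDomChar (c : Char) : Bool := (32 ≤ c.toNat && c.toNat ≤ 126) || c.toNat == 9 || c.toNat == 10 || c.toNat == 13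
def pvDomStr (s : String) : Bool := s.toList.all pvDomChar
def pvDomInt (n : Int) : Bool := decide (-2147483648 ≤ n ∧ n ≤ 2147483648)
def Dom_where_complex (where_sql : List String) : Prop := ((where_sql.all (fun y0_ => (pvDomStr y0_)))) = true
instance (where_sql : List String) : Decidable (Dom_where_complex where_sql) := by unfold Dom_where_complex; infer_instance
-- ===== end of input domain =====

-- B replaces A's count-mod-4 state machine (accumulators + trailing flush) with two direct
-- slice expressions; objective: simpler.

-- ===== PORT A =====
-- the loop body of A: state (count, test_list, flag_list, all_list), fed test[i]
def whereStepA (st : Int × List String × List String × List (List String)) (x : String) :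
    Int × List String × List String × List (List String) :=
  if PySem.Int.mod st.1 4 ≠ 0 then
    (st.1 + 1, st.2.1 ++ [x], st.2.2.1, st.2.2.2)
  else
    (st.1 + 1, ([] : List String), st.2.2.1 ++ [x], st.2.2.2 ++ [st.2.1])

def where_complex (where_sql : List String) : List (List String) × List String :=
  let test := where_sql
  let st :=
    (PySem.List.pyRange 0 (PySem.List.len test)).foldl
      (fun st i => whereStepA st (PySem.List.pyGetD test i "")) (1, [], [], [])
  let all_list := if st.2.1 ≠ [] then st.2.2.2 ++ [st.2.1] else st.2.2.2
  (all_list, st.2.2.1)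

-- ===== PORT B =====
def where_complex_alt (where_sql : List String) : List (List String) × List String :=
  let all_list := (PySem.List.pyRange 0 (PySem.List.len where_sql) 4).map
      (fun i => PySem.List.slice where_sql (some i) (some (i + 3)))
  let flag_list := (PySem.List.slice? where_sql (some 3) none 4).getD []
  (all_list, flag_list)

-- ===== PRECONDITION & SPEC =====
def Spec_where_complex (where_sql : List String) (out : List (List String) × List String) : Prop := out = where_complex_alt where_sql
instance (where_sql : List String) (out : List (List String) × List String) : Decidable (Spec_where_complex where_sql out) := by unfold Spec_where_complex; infer_instance

-- ===== CLAIM (what is proved, stated in full; the proofs are below) =====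
def Claim_equal_where_complex : Prop := ∀ (where_sql : List String), Dom_where_complex where_sql → Spec_where_complex where_sql (where_complex where_sql)

-- ===== LEMMAS AND PROOFS =====

-- common reference shape: groups of three and every fourth element, recursively
def chunksRec : List String → List (List String)
  | [] => []
  | a :: b :: c :: _ :: rest => [a, b, c] :: chunksRec rest
  | xs => [xs]

def flagsRec : List String → List String
  | _ :: _ :: _ :: d :: rest => d :: flagsRec rest
  | _ => []

lemma loopA (xs : List String) : ∀ (k : Int) (fl : List String) (al : List (List String)),
    (let r := xs.foldl whereStepA (4 * k + 1, [], fl, al)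
     ((if r.2.1 ≠ [] then r.2.2.2 ++ [r.2.1] else r.2.2.2), r.2.2.1))
      = (al ++ chunksRec xs, fl ++ flagsRec xs) := by
  induction xs using chunksRec.induct with
  | case1 => intro k fl al; simp [chunksRec, flagsRec]
  | case2 a b c d rest ih =>
    intro k fl al
    have d1 : ¬ (4:Int) ∣ 4*k+1 := by omega
    have d2 : ¬ (4:Int) ∣ 4*k+1+1 := by omega
    have d3 : ¬ (4:Int) ∣ 4*k+1+1+1 := by omega
    have d4 : (4:Int) ∣ 4*k+1+1+1+1 := by omega
    have hk : 4*k+1+1+1+1+1 = 4*(k+1)+1 := by ring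
    simp only [List.foldl_cons, whereStepA, PySem.Int.mod_eq_zero_iff_dvd, ne_eq, d1, d2, d3, d4,
      not_false_eq_true, if_true, if_false]
    rw [hk]
    have := ih (k+1) (fl ++ [d]) (al ++ [[a,b,c]])
    simp only [ne_eq, ite_not] at this
    simpa [chunksRec, flagsRec, List.append_assoc] using this
  | case3 xs h1 h2 =>
    intro k fl al
    have d1 : ¬ (4:Int) ∣ 4*k+1 := by omega
    have d2 : ¬ (4:Int) ∣ 4*k+1+1 := by omega
    have d3 : ¬ (4:Int) ∣ 4*k+1+1+1 := by omega
    match xs, h1, h2 with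
    | [a], _, _ => simp [whereStepA, PySem.Int.mod_eq_zero_iff_dvd, d1, chunksRec, flagsRec]
    | [a,b], _, _ => simp [whereStepA, PySem.Int.mod_eq_zero_iff_dvd, d1, d2, chunksRec, flagsRec]
    | [a,b,c], _, _ => simp [whereStepA, PySem.Int.mod_eq_zero_iff_dvd, d1, d2, d3, chunksRec, flagsRec]
    | a::b::c::d::rest, _, h2 => exact (h2 a b c d rest rfl).elim

lemma chunksB_aux (xs : List String) :
    (List.range ((xs.length + 3) / 4)).map (fun k => (xs.drop (4 * k)).take 3) = chunksRec xs := by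
  induction xs using chunksRec.induct with
  | case1 => simp [chunksRec]
  | case2 a b c d rest ih =>
    have hc : ((a::b::c::d::rest).length + 3) / 4 = (rest.length + 3) / 4 + 1 := by
      simp only [List.length_cons]; omega
    rw [hc, List.range_succ_eq_map, List.map_cons, List.map_map]
    have hd : ∀ k : Nat, ((a::b::c::d::rest).drop (4 * (k + 1))) = rest.drop (4 * k) := by
      intro k
      have h4 : 4 * (k + 1) = 4 * k + 1 + 1 + 1 + 1 := by ring
      rw [h4]; simp
    have hmap : (List.range ((rest.length + 3) / 4)).map
        ((fun k => ((a::b::c::d::rest).drop (4 * k)).take 3) ∘ Nat.succ)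
        = (List.range ((rest.length + 3) / 4)).map (fun k => (rest.drop (4 * k)).take 3) := by
      apply List.map_congr_left
      intro k _
      simp only [Function.comp_apply, Nat.succ_eq_add_one, hd]
    rw [hmap, ih]
    simp [chunksRec]
  | case3 xs h1 h2 =>
    match xs, h1, h2 with
    | [a], _, _ => simp [chunksRec]
    | [a,b], _, _ => simp [chunksRec]
    | [a,b,c], _, _ => simp [chunksRec]
    | a::b::c::d::rest, _, h2 => exact (h2 a b c d rest rfl).elim

lemma chunksB (xs : List String) :
    (PySem.List.pyRange 0 (PySem.List.len xs) 4).map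
      (fun i => PySem.List.slice xs (some i) (some (i + 3))) = chunksRec xs := by
  rw [PySem.List.pyRange_of_pos 0 (PySem.List.len xs) (by norm_num), List.map_map]
  have hcnt : (if (0:Int) < PySem.List.len xs then ((PySem.List.len xs - 0 + 4 - 1) / 4).toNat else 0)
      = (xs.length + 3) / 4 := by
    simp only [PySem.List.len]
    split_ifs with h <;> omega
  rw [hcnt]
  have hf : (List.range ((xs.length + 3) / 4)).map
      ((fun i => PySem.List.slice xs (some i) (some (i + 3))) ∘ fun k : Nat => 0 + 4 * (k : Int))
      = (List.range ((xs.length + 3) / 4)).map (fun k => (xs.drop (4 * k)).take 3) := by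
    apply List.map_congr_left
    intro k _
    have h1 : (0 + 4 * (k : Int)) = ((4 * k : Nat) : Int) := by push_cast; ring
    have h2 : (0 + 4 * (k : Int) + 3) = ((4 * k + 3 : Nat) : Int) := by push_cast; ring
    have h3 : 4 * k + 3 - 4 * k = 3 := by omega
    simp only [Function.comp_apply]
    rw [h2, h1, PySem.List.slice_natCast, h3]
  rw [hf, chunksB_aux]

lemma flagsB (xs : List String) :
    (PySem.List.slice? xs (some 3) none 4).getD [] = flagsRec xs := by
  induction xs using flagsRec.induct with
  | case1 a b c d rest ih =>
    simp [PySem.List.slice?, PySem.List.sliceIndices] at ih ⊢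
    have hm : min 3 ((rest.length : Int) + 1 + 1 + 1 + 1) = 3 := by omega
    rw [hm, if_pos (by omega)]
    have hcnt : (((rest.length : Int) + 1 + 1 + 1 + 1 - 3 + 4 - 1) / 4).toNat = rest.length / 4 + 1 := by
      omega
    have hcnt' : (if 3 < rest.length then (((rest.length : Int) - min 3 (rest.length : Int) + 4 - 1) / 4).toNat else 0)
        = rest.length / 4 := by
      split_ifs with h <;> omega
    rw [hcnt' ] at ih
    rw [hcnt, List.range_succ_eq_map, List.filterMap_cons, List.filterMap_map]
    have h0 : ((3 : Int) + 4 * ((0:Nat) : Int)).toNat = 3 := by omega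
    simp only [h0]
    have hstep : ∀ k : Nat, ((fun x : Nat => (a :: b :: c :: d :: rest)[((3:Int) + 4 * (x : Int)).toNat]?) ∘ Nat.succ) k
        = rest[((3:Int) + 4 * (k : Int)).toNat]? := by
      intro k
      have h4 : ((3:Int) + 4 * ((k:Nat).succ : Int)).toNat = ((3:Int) + 4 * (k : Int)).toNat + 1 + 1 + 1 + 1 := by
        push_cast; omega
      simp only [Function.comp_apply, h4, List.getElem?_cons_succ]
    rw [List.filterMap_congr (fun k _ => hstep k)]
    rcases Nat.lt_or_ge 3 rest.length with hgt | hle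
    · have hm2 : min 3 ((rest.length : Int)) = 3 := by omega
      rw [hm2] at ih
      simp [flagsRec, ih]
    · have hz : rest.length / 4 = 0 := by omega
      have hfl : flagsRec rest = [] := by
        match rest, hle with
        | [], _ => rfl
        | [a'], _ => rfl
        | [a', b'], _ => rfl
        | [a', b', c'], _ => rfl
      simp [hz, flagsRec, hfl]
  | case2 xs h =>
    simp only [PySem.List.slice?, PySem.List.sliceIndices]
    have hlen : xs.length ≤ 3 := by
      by_contra hgt
      push_neg at hgt
      match xs, hgt with
      | a :: b :: c :: d :: rest, _ => exact h a b c d rest rfl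
    have hm : min 3 ((xs.length : Int)) = xs.length := by omega
    have hfl : flagsRec xs = [] := by
      match xs, hlen with
      | [], _ => rfl
      | [a], _ => rfl
      | [a, b], _ => rfl
      | [a, b, c], _ => rfl
    simp [hm, hfl]

-- ===== VERDICT (by name: the statement is the Claim_ definition above) =====
theorem where_complex_spec : Claim_equal_where_complex := by
  intro xs _
  unfold Spec_where_complex where_complex where_complex_alt
  simp only
  rw [PySem.List.foldl_pyRange_pyGetD xs "" whereStepA (1, [], [], []) le_rfl]
  have h := loopA xs 0 [] []
  simp only [Int.mul_zero, Int.zero_add, List.nil_append, List.drop_zero] at h ⊢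
  rw [chunksB, flagsB]
  exact h
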